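-- pv_equiv track=rewrite | github.com/PotapenkoEugene/soloLTRs | scripts/semisyn/build_consensus_lib.py | parse_family_from_header
-- ===== SOURCE A (Python) =====
-- def parse_family_from_header(header: str) -> tuple[str, bool]:
--     """
--     Parse family name and whether it is an internal-region sequence.
--
--     EDTA/RepBase naming conventions handled:
--       RLC_Angela#LTR/Copia         → family=RLC_Angela, is_internal=False
--       RLC_Angela-I#LTR/Copia       → family=RLC_Angela, is_internal=True
--       RLC_Angela-INT#LTR/Copia     → family=RLC_Angela, is_internal=True
--       RLC_Angela_INT#LTR/Copia     → family=RLC_Angela, is_internal=True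
--       RLG_Dasheng#LTR/Gypsy-I      → family=RLG_Dasheng, is_internal=True (suffix in class)
--     """
--     # Take first whitespace-delimited token as the ID
--     name = header.split()[0]
--
--     # Split on '#' to get the base name vs classification
--     if "#" in name:
--         base, cls = name.split("#", 1)
--     else:
--         base = name
--         cls = ""
--
--     # Check for internal-region suffixes in base name
--     is_internal = False
--     INTERNAL_SUFFIXES = ("-I", "_I", "-INT", "_INT", "-int", "_int")
--     for suf in INTERNAL_SUFFIXES:
--         if base.upper().endswith(suf.upper()):
--             base = base[: -len(suf)]
--             is_internal = True
--             break
--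
--     # Also check if the classification explicitly marks it as internal
--     if not is_internal and cls.endswith("-I"):
--         is_internal = True
--
--     return base, is_internal
-- ===== SOURCE B (Python) =====
-- def parse_family_from_header(header: str) -> tuple[str, bool]:
--     name = header.split()[0]
--     if "#" in name:
--         base, cls = name.split("#", 1)
--     else:
--         base, cls = name, ""
--     u = base.upper()
--     if u[-2:] in ("-I", "_I"):
--         return base[:-2], True
--     if u[-4:] in ("-INT", "_INT"):
--         return base[:-4], True
--     return base, cls.endswith("-I")
-- ===== Notes on version B (the rewrite author's own statement) =====
-- stated objective: simpler
-- what changed: Replaces A's six-entry loop of upper/endswith suffix tests by uppercasing the base once and comparing its last-2 and last-4 character slices against the suffix literals directly, with no loop.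
import Mathlib
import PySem

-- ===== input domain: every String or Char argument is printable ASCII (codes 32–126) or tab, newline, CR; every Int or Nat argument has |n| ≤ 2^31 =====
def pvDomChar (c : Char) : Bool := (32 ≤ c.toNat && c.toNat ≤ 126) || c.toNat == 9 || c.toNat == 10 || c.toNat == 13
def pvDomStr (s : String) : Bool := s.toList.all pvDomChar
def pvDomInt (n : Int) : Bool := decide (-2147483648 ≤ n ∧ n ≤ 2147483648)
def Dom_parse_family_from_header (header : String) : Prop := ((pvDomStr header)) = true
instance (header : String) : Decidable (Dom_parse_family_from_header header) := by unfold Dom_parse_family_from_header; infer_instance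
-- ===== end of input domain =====

-- B replaces A's six-entry upper/endswith suffix loop by two direct slice comparisons on the
-- uppercased base (simpler, no loop); return values are proved identical wherever A returns.

-- ===== PORT A =====
-- shared transliteration of the '#'-split block (identical source code in Source A and Source B):
-- if "#" in name: base, cls = name.split("#", 1) else: base, cls = name, ""
def pvSplitHash (name : String) : String × String :=
  if PySem.Str.isIn "#" name then
    match PySem.Str.splitMax? name "#" 1 with
    | some (b :: c :: _) => (b, c)
    | _ => (name, "")   -- unreachable: split("#",1) with "#" in name yields two parts
  else (name, "")

-- the 'for suf in INTERNAL_SUFFIXES: … break' loop, as structural recursion over the tuple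
def pvALoop (base : String) : List String → String × Bool
  | [] => (base, false)
  | suf :: rest =>
      if PySem.Str.endswith (PySem.Str.upper base) (PySem.Str.upper suf) then
        (PySem.Str.slice base none (some (-(PySem.Str.len suf : Int))), true)
      else pvALoop base rest

-- body of A after 'name = header.split()[0]' succeeded
def pvAAfter (name : String) : String × Bool :=
  let bc := pvSplitHash name
  let r := pvALoop bc.1 ["-I", "_I", "-INT", "_INT", "-int", "_int"]
  let isInternal := if !r.2 && PySem.Str.endswith bc.2 "-I" then true else r.2
  (r.1, isInternal)

def parse_family_from_header (header : String) : String × Bool :=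
  match PySem.List.pyGet? (PySem.Str.split₀ header) 0 with
  | none => ("", false)   -- unreachable under Pre_: Python raises IndexError here
  | some name => pvAAfter name

-- ===== PORT B =====
-- body of B after 'name = header.split()[0]' succeeded: upper once, two slice comparisons
def pvBAfter (name : String) : String × Bool :=
  let bc := pvSplitHash name
  let u := PySem.Str.upper bc.1
  if PySem.Str.slice u (some (-2)) none = "-I" ∨ PySem.Str.slice u (some (-2)) none = "_I" then
    (PySem.Str.slice bc.1 none (some (-2)), true)
  else if PySem.Str.slice u (some (-4)) none = "-INT" ∨ PySem.Str.slice u (some (-4)) none = "_INT" then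
    (PySem.Str.slice bc.1 none (some (-4)), true)
  else (bc.1, PySem.Str.endswith bc.2 "-I")

def parse_family_from_header_alt (header : String) : String × Bool :=
  match PySem.List.pyGet? (PySem.Str.split₀ header) 0 with
  | none => ("", false)   -- unreachable under Pre_
  | some name => pvBAfter name

-- ===== PRECONDITION & SPEC =====
-- Pre_ excludes only whitespace-only headers: there Python A raises IndexError when taking the first token.
def Pre_parse_family_from_header (header : String) : Prop := PySem.Str.split₀ header ≠ []
instance (header : String) : Decidable (Pre_parse_family_from_header header) := by unfold Pre_parse_family_from_header; infer_instance

def pvWitness_parse_family_from_header : String := "RLC_Angela-I#LTR/Copia"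

def Spec_parse_family_from_header (header : String) (out : String × Bool) : Prop := out = parse_family_from_header_alt header
instance (header : String) (out : String × Bool) : Decidable (Spec_parse_family_from_header header out) := by unfold Spec_parse_family_from_header; infer_instance

-- ===== CLAIM (what is proved, stated in full; the proofs are below) =====
def Claim_equal_parse_family_from_header : Prop := ∀ (header : String), Dom_parse_family_from_header header → Pre_parse_family_from_header header → Spec_parse_family_from_header header (parse_family_from_header header)

-- ===== LEMMAS AND PROOFS =====

-- 'u[-k:] == t' (t a string of length k) is exactly 'u.endswith(t)'
lemma pvSliceSuffix (s t : String) (i : Int) (k : Nat) (hik : i = -(k : Int)) (hk : 0 < k)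
    (ht : t.toList.length = k) :
    (PySem.Str.slice s (some i) none = t) ↔ (PySem.Str.endswith s t = true) := by
  subst hik
  rw [← String.toList_inj, PySem.Str.endswith_eq, PySem.Chars.endswith_iff,
    List.suffix_iff_eq_drop, ht]
  have hts : (PySem.Str.slice s (some (-(k : Int))) none).toList
      = s.toList.drop (s.toList.length - k) := by
    simp only [PySem.Str.toList_slice, PySem.Chars.slice_eq_listSlice]
    exact PySem.List.slice_from_neg_natCast s.toList k hk
  rw [hts, eq_comm]

lemma pvTail (base cls : String) :
    (let r := pvALoop base ["-I", "_I", "-INT", "_INT", "-int", "_int"]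
     let isInternal := if !r.2 && PySem.Str.endswith cls "-I" then true else r.2
     ((r.1, isInternal) : String × Bool))
    = (let u := PySem.Str.upper base
       if PySem.Str.slice u (some (-2)) none = "-I" ∨ PySem.Str.slice u (some (-2)) none = "_I" then
         (PySem.Str.slice base none (some (-2)), true)
       else if PySem.Str.slice u (some (-4)) none = "-INT" ∨ PySem.Str.slice u (some (-4)) none = "_INT" then
         (PySem.Str.slice base none (some (-4)), true)
       else (base, PySem.Str.endswith cls "-I")) := by
  have hu1 : PySem.Str.upper "-I" = "-I" := by decide
  have hu2 : PySem.Str.upper "_I" = "_I" := by decide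
  have hu3 : PySem.Str.upper "-INT" = "-INT" := by decide
  have hu4 : PySem.Str.upper "_INT" = "_INT" := by decide
  have hu5 : PySem.Str.upper "-int" = "-INT" := by decide
  have hu6 : PySem.Str.upper "_int" = "_INT" := by decide
  have hb1 := pvSliceSuffix (PySem.Str.upper base) "-I" (-2) 2 (by norm_num) (by norm_num) (by decide)
  have hb2 := pvSliceSuffix (PySem.Str.upper base) "_I" (-2) 2 (by norm_num) (by norm_num) (by decide)
  have hb3 := pvSliceSuffix (PySem.Str.upper base) "-INT" (-4) 4 (by norm_num) (by norm_num) (by decide)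
  have hb4 := pvSliceSuffix (PySem.Str.upper base) "_INT" (-4) 4 (by norm_num) (by norm_num) (by decide)
  simp only [pvALoop, hu1, hu2, hu3, hu4, hu5, hu6, hb1, hb2, hb3, hb4]
  by_cases h1 : PySem.Chars.endswith (PySem.Chars.upper base.toList) ['-', 'I'] = true <;>
  by_cases h2 : PySem.Chars.endswith (PySem.Chars.upper base.toList) ['_', 'I'] = true <;>
  by_cases h3 : PySem.Chars.endswith (PySem.Chars.upper base.toList) ['-', 'I', 'N', 'T'] = true <;>
  by_cases h4 : PySem.Chars.endswith (PySem.Chars.upper base.toList) ['_', 'I', 'N', 'T'] = true <;>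
  simp [h1, h2, h3, h4]

lemma pvAfter_eq (name : String) : pvAAfter name = pvBAfter name := by
  unfold pvAAfter pvBAfter
  exact pvTail (pvSplitHash name).1 (pvSplitHash name).2

-- ===== VERDICT (by name: the statement is the Claim_ definition above) =====
theorem parse_family_from_header_spec : Claim_equal_parse_family_from_header := by
  intro header _ hpre
  unfold Spec_parse_family_from_header parse_family_from_header parse_family_from_header_alt
  cases hg : PySem.List.pyGet? (PySem.Str.split₀ header) 0 with
  | none =>
      exfalso
      rcases h : PySem.Str.split₀ header with _ | ⟨a, rest⟩
      · exact hpre h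
      · rw [h] at hg
        simp [PySem.List.pyGet?, PySem.List.pyIdx?] at hg
  | some name => exact pvAfter_eq name
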